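-- pv_equiv track=rewrite | github.com/RedRem95/AoC2020 | AoC2020/Day06/__init__.py | _process_answers
-- ===== SOURCE A (Python) =====
-- def _process_answers(data):
--     ret = [[]]
--     for data_line in data:
--         if len(data_line) <= 0:
--             ret.append([])
--             continue
--         ret[-1].append([x for x in data_line if x != " "])
--     return [x for x in ret if len(x) > 0]
-- ===== SOURCE B (Python) =====
-- def _process_answers(data):
--     groups = []
--     i, n = 0, len(data)
--     while i < n:
--         if len(data[i]) <= 0:
--             i += 1
--             continue
--         j = i
--         while j < n and len(data[j]) > 0:
--             j += 1
--         groups.append([[x for x in line if x != " "] for line in data[i:j]])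
--         i = j
--     return groups
-- ===== Notes on version B (the rewrite author's own statement) =====
-- stated objective: idiomatic
-- what changed: B does one grouping pass over the lines (scan each run of non-blank lines and emit it directly as a group), instead of A's sentinel-seeded accumulator that appends a fresh empty group at every blank line and filters out empty groups at the end.
import Mathlib
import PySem

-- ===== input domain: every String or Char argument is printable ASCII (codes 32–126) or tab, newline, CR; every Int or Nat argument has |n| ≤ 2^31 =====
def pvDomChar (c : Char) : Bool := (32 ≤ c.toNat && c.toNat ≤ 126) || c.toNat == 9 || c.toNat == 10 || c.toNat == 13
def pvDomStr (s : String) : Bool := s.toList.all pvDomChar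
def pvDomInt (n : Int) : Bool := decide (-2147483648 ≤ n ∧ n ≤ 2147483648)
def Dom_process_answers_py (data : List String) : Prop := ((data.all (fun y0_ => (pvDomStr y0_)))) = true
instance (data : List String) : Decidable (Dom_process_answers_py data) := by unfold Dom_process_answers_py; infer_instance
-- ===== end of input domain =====

-- B replaces A's sentinel-seeded / append-empty-group-on-blank / final-filter scheme with a single
-- grouping pass that emits each run of non-blank lines directly (idiomatic; same cost).

-- ===== PORT A =====
-- ret[-1].append(v): append v to the last group of a non-empty list of groups
def pvAppendLast : List (List (List String)) → List String → List (List (List String))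
  | [], _ => []
  | [g], v => [g ++ [v]]
  | g :: g' :: gs, v => g :: pvAppendLast (g' :: gs) v

-- one iteration of A's for-loop
def pvStepA (ret : List (List (List String))) (line : String) : List (List (List String)) :=
  if line.toList.length ≤ 0 then ret ++ [[]]
  else pvAppendLast ret ((line.toList.filter (fun c => c ≠ ' ')).map (fun c => String.ofList [c]))

def process_answers_py (data : List String) : List (List (List String)) :=
  (data.foldl pvStepA [[]]).filter (fun g => decide (0 < g.length))

-- ===== PORT B =====
def pvBlank (line : String) : Bool := line.toList.length ≤ 0

-- one pass: skip blank lines, otherwise take the whole run of non-blank lines as a group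
def process_answers_py_alt : List String → List (List (List String))
  | [] => []
  | l :: ls =>
    if pvBlank l then process_answers_py_alt (ls.dropWhile pvBlank)
    else ((l :: ls).takeWhile (fun s => !pvBlank s)).map
           (fun line => (line.toList.filter (fun c => c ≠ ' ')).map (fun c => String.ofList [c]))
         :: process_answers_py_alt ((l :: ls).dropWhile (fun s => !pvBlank s))
termination_by data => data.length
decreasing_by
  · exact Nat.lt_succ_of_le (List.length_dropWhile_le _ _)
  · simp only [List.dropWhile]
    have hl : (!pvBlank l) = true := by simp_all
    rw [hl]
    exact Nat.lt_succ_of_le (List.length_dropWhile_le _ _)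

-- ===== PRECONDITION & SPEC =====
def Spec_process_answers_py (data : List String) (out : List (List (List String))) : Prop := out = process_answers_py_alt data
instance (data : List String) (out : List (List (List String))) : Decidable (Spec_process_answers_py data out) := by unfold Spec_process_answers_py; infer_instance

-- ===== CLAIM (what is proved, stated in full; the proofs are below) =====
def Claim_equal_process_answers_py : Prop := ∀ (data : List String), Dom_process_answers_py data → Spec_process_answers_py data (process_answers_py data)

-- ===== LEMMAS AND PROOFS =====

-- the processed form of one non-blank line
def pvLine (line : String) : List String :=
  (line.toList.filter (fun c => c ≠ ' ')).map (fun c => String.ofList [c])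

-- reference function: groups with an explicit current-group accumulator
def pvR : List String → List (List String) → List (List (List String))
  | [], cur => if cur = [] then [] else [cur]
  | l :: ls, cur =>
    if pvBlank l then (if cur = [] then pvR ls [] else cur :: pvR ls [])
    else pvR ls (cur ++ [pvLine l])

theorem pvAppendLast_append (acc : List (List (List String))) (cur : List (List String))
    (v : List String) : pvAppendLast (acc ++ [cur]) v = acc ++ [cur ++ [v]] := by
  induction acc with
  | nil => simp [pvAppendLast]
  | cons a as ih =>
    cases as with
    | nil => simp [pvAppendLast]
    | cons b bs =>
      simp only [List.cons_append, pvAppendLast] at ih ⊢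
      rw [ih]

theorem pvFilter_single (cur : List (List String)) :
    [cur].filter (fun g => decide (0 < g.length)) = if cur = [] then [] else [cur] := by
  cases cur <;> simp

theorem pvFoldl_filter (data : List String) (acc : List (List (List String)))
    (cur : List (List String)) :
    (List.foldl pvStepA (acc ++ [cur]) data).filter (fun g => decide (0 < g.length))
      = acc.filter (fun g => decide (0 < g.length)) ++ pvR data cur := by
  induction data generalizing acc cur with
  | nil => simp [pvR, List.filter_append, pvFilter_single]
  | cons l ls ih =>
    by_cases h : pvBlank l = true
    · have hb : l.toList.length ≤ 0 := by simpa [pvBlank] using h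
      have hstep : pvStepA (acc ++ [cur]) l = (acc ++ [cur]) ++ [[]] := by
        simp only [pvStepA]; rw [if_pos hb]
      simp only [List.foldl_cons, hstep]
      rw [ih (acc ++ [cur]) []]
      simp only [pvR, h, List.filter_append, pvFilter_single]
      by_cases hc : cur = [] <;> simp [hc]
    · have hstep : pvStepA (acc ++ [cur]) l = acc ++ [cur ++ [pvLine l]] := by
        simp only [pvStepA, pvLine]
        rw [if_neg (by simp [pvBlank] at h ⊢; omega), pvAppendLast_append]
      simp only [List.foldl_cons, hstep]
      rw [ih acc (cur ++ [pvLine l])]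
      simp [pvR, h]

theorem pvR_dropBlank (xs : List String) :
    pvR (xs.dropWhile pvBlank) [] = pvR xs [] := by
  induction xs with
  | nil => rfl
  | cons x xsTl ih =>
    by_cases h : pvBlank x = true
    · rw [List.dropWhile_cons_of_pos h, ih]
      simp [pvR, h]
    · rw [List.dropWhile_cons_of_neg h]

theorem pvR_run (xs : List String) (cur : List (List String)) (hc : cur ≠ []) :
    pvR xs cur = (cur ++ (xs.takeWhile (fun s => !pvBlank s)).map pvLine)
      :: pvR (xs.dropWhile (fun s => !pvBlank s)) [] := by
  induction xs generalizing cur with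
  | nil => simp [pvR, hc]
  | cons x xsTl ih =>
    by_cases h : pvBlank x = true
    · simp only [List.takeWhile_cons, List.dropWhile_cons, h, Bool.not_true]
      simp [pvR, h, hc]
    · have hnb : (!pvBlank x) = true := by simp_all
      simp only [List.takeWhile_cons, List.dropWhile_cons, hnb, if_true]
      simp only [pvR, h]
      rw [ih (cur ++ [pvLine x]) (by simp)]
      simp

theorem pvAlt_eq_R (xs : List String) : process_answers_py_alt xs = pvR xs [] := by
  induction xs using process_answers_py_alt.induct with
  | case1 => rw [process_answers_py_alt]; rfl
  | case2 l ls h ih =>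
    rw [process_answers_py_alt, if_pos h, ih, pvR_dropBlank]
    simp [pvR, h]
  | case3 l ls h ih =>
    have hnb : (!pvBlank l) = true := by simp_all
    rw [process_answers_py_alt, if_neg h, ih]
    show _ = pvR (l :: ls) []
    simp only [pvR, if_neg h, List.nil_append]
    rw [pvR_run ls [pvLine l] (by simp)]
    simp only [List.takeWhile_cons, List.dropWhile_cons, hnb, if_true]
    simp [pvLine]

-- ===== VERDICT (by name: the statement is the Claim_ definition above) =====
theorem process_answers_py_spec : Claim_equal_process_answers_py := by
  intro data _
  show process_answers_py data = process_answers_py_alt data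
  rw [pvAlt_eq_R]
  have h := pvFoldl_filter data [] []
  simpa [process_answers_py] using h
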